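-- pv_equiv track=rewrite | github.com/TSTP-Enterprises/DuplicateRemover | main.py | find_duplicates_with_context
-- ===== SOURCE A (Python) =====
-- def find_duplicates_with_context(lines, context_size=2):
--     duplicates_with_context = []
--     seen = set()
--     for i, line in enumerate(lines):
--         if line in seen:
--             previous_context = lines[max(0, i - context_size):i]
--             next_context = lines[i + 1:i + context_size + 1]
--             duplicates_with_context.append((line, {'previous': previous_context, 'next': next_context}))
--         else:
--             seen.add(line)
--     return duplicates_with_context
-- ===== SOURCE B (Python) =====
-- def find_duplicates_with_context(lines, context_size=2):
--     first_index = {}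
--     for i, line in enumerate(lines):
--         if line not in first_index:
--             first_index[line] = i
--     result = []
--     for i, line in enumerate(lines):
--         if first_index[line] != i:
--             result.append((line, {'previous': lines[max(0, i - context_size):i],
--                                   'next': lines[i + 1:i + context_size + 1]}))
--     return result
-- ===== Notes on version B (the rewrite author's own statement) =====
-- stated objective: alternative
-- what changed: Replaces the inline seen-set test (mutated while scanning) with a first pass that builds a first-occurrence index dict and a second non-mutating pass that flags position i exactly when first_index[line] != i.
import Mathlib
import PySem

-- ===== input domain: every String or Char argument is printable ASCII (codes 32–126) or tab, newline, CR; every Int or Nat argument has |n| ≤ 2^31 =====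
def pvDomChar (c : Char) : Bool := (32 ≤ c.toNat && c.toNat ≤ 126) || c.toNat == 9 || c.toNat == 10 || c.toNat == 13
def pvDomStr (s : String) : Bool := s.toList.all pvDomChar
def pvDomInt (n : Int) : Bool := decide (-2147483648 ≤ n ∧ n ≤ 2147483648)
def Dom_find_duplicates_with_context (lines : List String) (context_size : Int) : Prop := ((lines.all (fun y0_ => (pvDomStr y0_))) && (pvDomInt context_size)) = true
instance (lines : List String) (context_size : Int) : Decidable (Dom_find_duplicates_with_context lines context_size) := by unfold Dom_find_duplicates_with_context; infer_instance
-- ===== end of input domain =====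

-- B replaces A's inline mutated `seen` set by a first pass building a first-occurrence
-- index dict and a second non-mutating pass flagging positions where first_index[line] != i
-- (alternative decomposition, same asymptotic cost).

-- ===== PORT A =====
-- the (line, {'previous': …, 'next': …}) entry both Pythons build with the same expressions
def pvEntry (lines : List String) (context_size i : Int) (line : String) :
    String × (List (String × List String)) :=
  (line, [("previous", PySem.List.slice lines (some (max 0 (i - context_size))) (some i)),
          ("next", PySem.List.slice lines (some (i + 1)) (some (i + context_size + 1)))])

def find_duplicates_with_context (lines : List String) (context_size : Int) :
    List (String × (List (String × List String))) :=
  ((PySem.List.enumerate lines).foldl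
    (fun (st : List (String × (List (String × List String))) × PySem.Set String) p =>
      if PySem.Set.contains st.2 p.2 then
        (st.1 ++ [pvEntry lines context_size p.1 p.2], st.2)
      else
        (st.1, PySem.Set.add st.2 p.2))
    ([], PySem.Set.empty)).1

-- ===== PORT B =====
def find_duplicates_with_context_alt (lines : List String) (context_size : Int) :
    List (String × (List (String × List String))) :=
  let first_index : PySem.Dict String Int :=
    (PySem.List.enumerate lines).foldl
      (fun d p => if d.contains p.2 then d else d.insert p.2 p.1) PySem.Dict.empty
  (PySem.List.enumerate lines).foldl
    (fun acc p =>
      if first_index.getD p.2 (-1) != p.1 then acc ++ [pvEntry lines context_size p.1 p.2]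
      else acc)
    []

-- ===== PRECONDITION & SPEC =====
def Spec_find_duplicates_with_context (lines : List String) (context_size : Int) (out : List (String × (List (String × List String)))) : Prop := out = find_duplicates_with_context_alt lines context_size
instance (lines : List String) (context_size : Int) (out : List (String × (List (String × List String)))) : Decidable (Spec_find_duplicates_with_context lines context_size out) := by unfold Spec_find_duplicates_with_context; infer_instance

-- ===== CLAIM (what is proved, stated in full; the proofs are below) =====
def Claim_equal_find_duplicates_with_context : Prop := ∀ (lines : List String) (context_size : Int), Dom_find_duplicates_with_context lines context_size → Spec_find_duplicates_with_context lines context_size (find_duplicates_with_context lines context_size)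

-- ===== LEMMAS AND PROOFS =====

-- the dict-building fold returns the index of the FIRST occurrence (find? over the pairs)
theorem pvDict_fold_get? (l : List (Int × String)) (d : PySem.Dict String Int) (x : String) :
    ((l.foldl (fun d p => if d.contains p.2 then d else d.insert p.2 p.1) d).get? x)
      = if d.contains x then d.get? x else (l.find? (fun p => p.2 == x)).map (·.1) := by
  induction l generalizing d with
  | nil =>
    simp only [List.foldl_nil, List.find?_nil, Option.map_none]
    by_cases hdx : d.contains x = true
    · simp [hdx]
    · simp [hdx, (PySem.Dict.get?_eq_none_iff_contains d x).mpr (Bool.eq_false_iff.mpr hdx)]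
  | cons p l ih =>
    simp only [List.foldl_cons, List.find?_cons]
    by_cases hc : d.contains p.2 = true
    · rw [if_pos hc, ih]
      by_cases hx : x = p.2
      · subst hx; simp [hc]
      · have : (p.2 == x) = false := by simp [Ne.symm hx]
        simp [this]
    · rw [if_neg hc, ih]
      by_cases hx : x = p.2
      · subst hx
        simp [PySem.Dict.get?_insert_self, hc]
      · have hne : (p.2 == x) = false := by simp [Ne.symm hx]
        have h1 : (d.insert p.2 p.1).contains x = d.contains x := by
          simp [PySem.Dict.contains_insert, hx]
        rw [h1, PySem.Dict.get?_insert]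
        by_cases hdx : d.contains x = true
        · simp [hdx, hx]
        · simp [hdx, hne]

-- the B-side test at position pre.length equals A's seen-membership test
theorem pvCond_eq (pre rest : List String) (x : String) :
    ((((PySem.List.enumerate (pre ++ x :: rest)).foldl
        (fun d p => if d.contains p.2 then d else d.insert p.2 p.1)
        PySem.Dict.empty).getD x (-1)) != (pre.length : Int))
      = PySem.Set.contains (PySem.Set.ofList pre) x := by
  rw [PySem.Dict.getD_eq_get?_getD, pvDict_fold_get? _ PySem.Dict.empty x]
  simp only [PySem.Dict.contains_empty, if_neg (Bool.false_ne_true)]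
  have hsplit : PySem.List.enumerate (pre ++ x :: rest) 0
      = PySem.List.enumerate pre 0 ++
        ((pre.length : Int), x) :: PySem.List.enumerate rest ((pre.length : Int) + 1) := by
    rw [PySem.List.enumerate_append, PySem.List.enumerate_cons]
    norm_num
  by_cases hx : x ∈ pre
  · have hcont : PySem.Set.contains (PySem.Set.ofList pre) x = true := by
      rw [PySem.Set.contains_iff, PySem.Set.mem_ofList]; exact hx
    rw [hcont]
    obtain ⟨k, hk, hxk⟩ := List.mem_iff_getElem.mp hx
    have hmem : ((0 + (k : Int), x) : Int × String) ∈ PySem.List.enumerate pre 0 :=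
      (PySem.List.mem_enumerate_iff pre 0 _).mpr ⟨k, hk, by rw [hxk]⟩
    have hsome : ((PySem.List.enumerate pre 0).find? (fun p => p.2 == x)).isSome := by
      rw [List.find?_isSome]
      exact ⟨_, hmem, by simp⟩
    obtain ⟨q, hq⟩ := Option.isSome_iff_exists.mp hsome
    have hqin := List.mem_of_find?_eq_some hq
    obtain ⟨k', hk', hq'⟩ := (PySem.List.mem_enumerate_iff pre 0 q).mp hqin
    rw [hsplit, List.find?_append, hq, hq']
    simp only [Option.some_or, Option.map_some, Option.getD_some]
    rw [bne_iff_ne]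
    omega
  · have hcont : PySem.Set.contains (PySem.Set.ofList pre) x = false := by
      rw [Bool.eq_false_iff]
      intro h
      exact hx ((PySem.Set.mem_ofList pre x).mp ((PySem.Set.contains_iff _ _).mp h))
    rw [hcont]
    have hnone : (PySem.List.enumerate pre 0).find? (fun p => p.2 == x) = none := by
      rw [List.find?_eq_none]
      intro q hq
      rcases (PySem.List.mem_enumerate_iff pre 0 q).mp hq with ⟨k, hk, rfl⟩
      simp only [beq_iff_eq]
      intro h; exact hx (h ▸ List.getElem_mem hk)
    rw [hsplit, List.find?_append, hnone]
    simp

-- the two loops agree step by step: A's state set over the prefix, B's dict over all lines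
theorem pvLoop_eq (cs : Int) (lines : List String) :
    ∀ (rest pre : List String) (acc : List (String × (List (String × List String)))),
      lines = pre ++ rest →
      ((PySem.List.enumerate rest (pre.length : Int)).foldl
        (fun (st : List (String × (List (String × List String))) × PySem.Set String) p =>
          if PySem.Set.contains st.2 p.2 then
            (st.1 ++ [pvEntry lines cs p.1 p.2], st.2)
          else
            (st.1, PySem.Set.add st.2 p.2))
        (acc, PySem.Set.ofList pre)).1
      = (PySem.List.enumerate rest (pre.length : Int)).foldl
          (fun acc p =>
            if (((PySem.List.enumerate lines).foldl
                  (fun d p => if d.contains p.2 then d else d.insert p.2 p.1)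
                  PySem.Dict.empty).getD p.2 (-1)) != p.1 then
              acc ++ [pvEntry lines cs p.1 p.2]
            else acc)
          acc := by
  intro rest
  induction rest with
  | nil => intro pre acc _; simp [PySem.List.enumerate]
  | cons x rest ih =>
    intro pre acc hl
    subst hl
    rw [PySem.List.enumerate_cons, List.foldl_cons, List.foldl_cons]
    rw [pvCond_eq pre rest x]
    have hpre1 : ((pre ++ [x]).length : Int) = (pre.length : Int) + 1 := by simp
    have happ : pre ++ x :: rest = (pre ++ [x]) ++ rest := by simp
    by_cases hc : PySem.Set.contains (PySem.Set.ofList pre) x = true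
    · rw [hc]
      simp only [if_true]
      have hset : PySem.Set.ofList (pre ++ [x]) = PySem.Set.ofList pre := by
        rw [PySem.Set.ofList_eq_foldl, List.foldl_append, ← PySem.Set.ofList_eq_foldl]
        simp only [List.foldl_cons, List.foldl_nil, PySem.Set.add, hc, if_pos]

      have := ih (pre ++ [x]) (acc ++ [pvEntry (pre ++ x :: rest) cs (pre.length : Int) x])
        (by simp)
      rw [hpre1, hset] at this
      rw [happ] at this ⊢
      exact this
    · rw [Bool.eq_false_iff.mpr hc]
      simp only [if_neg (Bool.false_ne_true)]
      have hset : PySem.Set.ofList (pre ++ [x]) = PySem.Set.add (PySem.Set.ofList pre) x := by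
        rw [PySem.Set.ofList_eq_foldl, List.foldl_append, ← PySem.Set.ofList_eq_foldl]
        simp
      have := ih (pre ++ [x]) acc (by simp)
      rw [hpre1, hset] at this
      rw [happ] at this ⊢
      exact this

-- ===== VERDICT (by name: the statement is the Claim_ definition above) =====
theorem find_duplicates_with_context_spec : Claim_equal_find_duplicates_with_context := by
  intro lines context_size _
  unfold Spec_find_duplicates_with_context find_duplicates_with_context find_duplicates_with_context_alt
  have := pvLoop_eq context_size lines lines [] [] rfl
  simpa using this
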